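-- pv_equiv track=rewrite | github.com/vendramin/L | discrete/discrete.py | invdictionary
-- ===== SOURCE A (Python) =====
-- import math, itertools
--
-- def invdictionary(n): # a dictionary with inverses of permutations - so we need not calculate them every time!
--     dict = {}
--     for perm in itertools.permutations(range(1,n+1)):
--         inv = [None]*n
--         for k in range(n):
--             inv[perm[k]-1] = k+1
--         dict.update({perm:inv})
--     return dict
-- ===== SOURCE B (Python) =====
-- import itertools
--
-- def invdictionary(n):
--     # Inverse via argsort: sort (value, position) pairs by value; positions come out in value order.
--     rng = range(1, n + 1)
--     return {perm: [pos for _, pos in sorted(zip(perm, rng), key=lambda t: t[0])]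
--             for perm in itertools.permutations(rng)}
-- ===== Notes on version B (the rewrite author's own statement) =====
-- stated objective: alternative
-- what changed: Each inverse is computed by an argsort: sort the (value, position) pairs by value and read off the positions, instead of A's scatter loop that writes each position into the slot indexed by its value; the dict is built by a comprehension over the same permutation stream.
import Mathlib
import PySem

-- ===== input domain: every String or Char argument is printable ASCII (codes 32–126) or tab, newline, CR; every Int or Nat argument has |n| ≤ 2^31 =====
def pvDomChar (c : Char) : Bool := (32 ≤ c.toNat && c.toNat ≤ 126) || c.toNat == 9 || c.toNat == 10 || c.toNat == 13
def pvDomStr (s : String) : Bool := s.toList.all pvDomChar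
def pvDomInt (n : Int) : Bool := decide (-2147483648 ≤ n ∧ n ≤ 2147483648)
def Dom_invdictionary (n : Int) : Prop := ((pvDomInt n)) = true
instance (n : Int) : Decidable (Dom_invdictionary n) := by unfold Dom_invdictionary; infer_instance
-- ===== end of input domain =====

-- B computes each inverse by sorting (value, position) pairs instead of A's scatter loop; alternative decomposition, same results.

-- ===== PORT A =====
-- inv = [None]*n with every slot overwritten before it is read: ported as replicate with a 0 placeholder.
-- inv[perm[k]-1] = k+1: the index perm[k]-1 is always ≥ 0 here (perm values are 1..n), so .toNat is exact.
def invdictionary (n : Int) : List (List Int × List Int) :=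
  ((PySem.List.permutations (PySem.List.pyRange 1 (n+1) 1) (PySem.List.pyRange 1 (n+1) 1).length).foldl
    (fun d perm =>
      let inv := (PySem.List.pyRange 0 n 1).foldl
        (fun inv k => inv.set ((PySem.List.pyGetD perm k 0) - 1).toNat (k + 1))
        (List.replicate n.toNat 0)
      d.insert perm inv)
    PySem.Dict.empty).items

-- ===== PORT B =====
def invdictionary_alt (n : Int) : List (List Int × List Int) :=
  (PySem.Dict.ofList
    ((PySem.List.permutations (PySem.List.pyRange 1 (n+1) 1) (PySem.List.pyRange 1 (n+1) 1).length).map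
      (fun perm =>
        (perm, (PySem.List.sorted (perm.zip (PySem.List.pyRange 1 (n+1) 1)) (fun t => t.1) false).map
                 (fun t => t.2))))).items

-- ===== PRECONDITION & SPEC =====
def Spec_invdictionary (n : Int) (out : List (List Int × List Int)) : Prop := out = invdictionary_alt n
instance (n : Int) (out : List (List Int × List Int)) : Decidable (Spec_invdictionary n out) := by unfold Spec_invdictionary; infer_instance

-- ===== CLAIM (what is proved, stated in full; the proofs are below) =====
def Claim_equal_invdictionary : Prop := ∀ (n : Int), Dom_invdictionary n → Spec_invdictionary n (invdictionary n)

-- ===== LEMMAS AND PROOFS =====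

-- the list of permutations of a duplicate-free list is itself duplicate-free
theorem pv_perms_nodup {α : Type} [DecidableEq α] (r : ℕ) (xs : List α) (h : xs.Nodup) :
    (PySem.List.permutations xs r).Nodup := by
  induction r generalizing xs with
  | zero => simp [PySem.List.permutations_zero]
  | succ r ih =>
    have hrw : PySem.List.permutations xs (r+1) =
        (List.range xs.length).flatMap
          (fun i => match xs[i]? with
            | none => []
            | some a => (PySem.List.permutations (xs.eraseIdx i) r).map (a :: ·)) := by
      simp only [PySem.List.permutations]
      rfl
    rw [hrw, List.nodup_flatMap]
    constructor
    · intro i hi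
      rw [List.mem_range] at hi
      simp only [List.getElem?_eq_getElem hi]
      exact (ih _ (h.eraseIdx i)).map (fun p q hpq => by simpa using hpq)
    · have : ∀ i j : ℕ, i < j → i < xs.length → j < xs.length →
          Function.onFun List.Disjoint
            (fun i => match xs[i]? with
              | none => []
              | some a => (PySem.List.permutations (xs.eraseIdx i) r).map (a :: ·)) i j := by
        intro i j hij hi hj
        simp only [Function.onFun, List.getElem?_eq_getElem hi, List.getElem?_eq_getElem hj]
        intro q hqi hqj
        rcases List.mem_map.mp hqi with ⟨p1, _, rfl⟩
        rcases List.mem_map.mp hqj with ⟨p2, _, he⟩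
        have hheads : xs[j] = xs[i] := (List.cons.injEq _ _ _ _ ▸ he).1
        exact absurd (h.getElem_inj_iff.mp hheads) (Nat.ne_of_gt hij)
      refine List.pairwise_iff_forall_sublist.mpr ?_
      intro i j hsub
      have hij : i < j ∧ i ∈ List.range xs.length ∧ j ∈ List.range xs.length := by
        constructor
        · exact List.pairwise_iff_forall_sublist.mp List.pairwise_lt_range hsub
        · constructor <;> [exact hsub.subset (by simp); exact hsub.subset (by simp)]
      exact this i j hij.1 (List.mem_range.mp hij.2.1) (List.mem_range.mp hij.2.2)

-- length of a fold of List.set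
theorem pv_foldl_set_length (ks : List ℕ) (g : ℕ → ℕ) (f : ℕ → Int) (init : List Int) :
    (ks.foldl (fun inv k => inv.set (g k) (f k)) init).length = init.length := by
  induction ks generalizing init with
  | nil => rfl
  | cons a t ih => simp [List.foldl_cons, ih]

-- reading back the unique write: after scattering f k into slot g k for each k, slot g k₀ holds f k₀
theorem pv_foldl_set_get (ks : List ℕ) (g : ℕ → ℕ) (f : ℕ → Int) (init : List Int) (k₀ : ℕ)
    (hk : k₀ ∈ ks) (hu : ∀ k' ∈ ks, g k' = g k₀ → k' = k₀) (hlt : g k₀ < init.length) :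
    (ks.foldl (fun inv k => inv.set (g k) (f k)) init)[g k₀]? = some (f k₀) := by
  induction ks using List.reverseRecOn with
  | nil => cases hk
  | append_singleton t a ih =>
    rw [List.foldl_append]
    simp only [List.foldl_cons, List.foldl_nil]
    by_cases ha : a = k₀
    · subst ha
      have hlen : g a < (t.foldl (fun inv k => inv.set (g k) (f k)) init).length := by
        rw [pv_foldl_set_length]; exact hlt
      simp [List.getElem?_set_self hlen]
    · have hga : g a ≠ g k₀ := fun h => ha (hu a (by simp) h)
      rw [List.getElem?_set_ne hga]
      have hk' : k₀ ∈ t := by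
        rcases List.mem_append.mp hk with h | h
        · exact h
        · exact absurd (List.mem_singleton.mp h).symm ha
      exact ih hk' (fun k' hk'' => hu k' (List.mem_append_left _ hk''))

-- zip with a unit-step range, as a map over List.range
theorem pv_zip_pyRange (p : List Int) (a : Int) :
    p.zip (PySem.List.pyRange a (a + p.length) 1) =
      (List.range p.length).map (fun k => (p.getD k 0, a + (k : Int))) := by
  induction p generalizing a with
  | nil => simp [PySem.List.pyRange_one_eq_nil]
  | cons x t ih =>
    have h1 : a < a + ((x :: t).length : Int) := by
      simp only [List.length_cons]; push_cast; omega
    rw [PySem.List.pyRange_one_cons h1]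
    have h2 : a + ((x :: t).length : Int) = (a + 1) + (t.length : Int) := by
      simp only [List.length_cons]; push_cast; ring
    rw [h2, List.zip_cons_cons, ih (a+1), List.length_cons, List.range_succ_eq_map, List.map_cons]
    simp only [List.map_map, List.getD_cons_zero, Function.comp_def, List.getD_cons_succ]
    congr 1
    · simp
    · apply List.map_congr_left
      intro k _
      congr 1
      push_cast
      ring

-- the heart: for any rearrangement p of 1..n, A's scatter loop equals B's argsort
theorem pv_inv_eq (n : Int) (p : List Int) (hp : p.Perm (PySem.List.pyRange 1 (n+1) 1)) :
    (PySem.List.pyRange 0 n 1).foldl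
        (fun inv k => inv.set ((PySem.List.pyGetD p k 0) - 1).toNat (k + 1))
        (List.replicate n.toNat 0)
      = (PySem.List.sorted (p.zip (PySem.List.pyRange 1 (n+1) 1)) (fun t => t.1) false).map
          (fun t => t.2) := by
  by_cases hn : n ≤ 0
  · have hR : PySem.List.pyRange 1 (n+1) 1 = [] := PySem.List.pyRange_one_eq_nil (by omega)
    have hp0 : p = [] := by rw [hR] at hp; exact hp.eq_nil
    have h0 : PySem.List.pyRange 0 n 1 = [] := PySem.List.pyRange_one_eq_nil (by omega)
    have hN : n.toNat = 0 := by omega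
    simp [hR, hp0, h0, hN, PySem.List.sorted_eq_nil_iff]
  · rw [not_le] at hn
    have hNn : ((n.toNat : Int)) = n := Int.toNat_of_nonneg (le_of_lt hn)
    have hRlen : (PySem.List.pyRange 1 (n+1) 1).length = n.toNat := by
      rw [PySem.List.length_pyRange_one]; omega
    have hlen : p.length = n.toNat := hp.length_eq.trans hRlen
    have hnd : p.Nodup := hp.nodup_iff.mpr (PySem.List.nodup_pyRange_one 1 (n+1))
    have hmem : ∀ v : Int, v ∈ p ↔ 1 ≤ v ∧ v < n+1 := fun v =>
      hp.mem_iff.trans (PySem.List.mem_pyRange_one)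
    -- the sorted zip, named explicitly: pairs (v, idxOf v p + 1) in increasing order of v
    have hsort : PySem.List.sorted (p.zip (PySem.List.pyRange 1 (n+1) 1)) (fun t => t.1) false
        = (PySem.List.pyRange 1 (n+1) 1).map (fun v => (v, (List.idxOf v p : Int) + 1)) := by
      apply PySem.List.sorted_eq_of_perm_of_pairwise_lt
      · -- the map is a permutation of the zip: both Nodup, same members
        have hLnd : ((PySem.List.pyRange 1 (n+1) 1).map
            (fun v => (v, (List.idxOf v p : Int) + 1))).Nodup :=
          (PySem.List.nodup_pyRange_one 1 (n+1)).map (fun a b h => congrArg Prod.fst h)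
        have hznd : (p.zip (PySem.List.pyRange 1 (n+1) 1)).Nodup := by
          apply List.Nodup.of_map Prod.fst
          rw [List.map_fst_zip (l₁ := p) (by rw [hlen, hRlen])]
          exact hnd
        rw [List.perm_ext_iff_of_nodup hLnd hznd]
        rintro ⟨v, i⟩
        have hzip : p.zip (PySem.List.pyRange 1 (n+1) 1)
            = (List.range p.length).map (fun k => (p.getD k 0, 1 + (k : Int))) := by
          have : PySem.List.pyRange 1 (n+1) 1 = PySem.List.pyRange 1 (1 + (p.length : Int)) 1 := by
            rw [hlen]; congr 1; omega
          rw [this, pv_zip_pyRange]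
        rw [hzip]
        simp only [List.mem_map, PySem.List.mem_pyRange_one, List.mem_range, Prod.mk.injEq]
        constructor
        · rintro ⟨v', ⟨h1, h2⟩, rfl, rfl⟩
          have hv'p : v' ∈ p := (hmem v').mpr ⟨h1, h2⟩
          have hklt : List.idxOf v' p < p.length := List.idxOf_lt_length_of_mem hv'p
          refine ⟨List.idxOf v' p, hklt, ?_, by ring⟩
          rw [List.getD_eq_getElem p 0 hklt, List.getElem_idxOf hklt]
        · rintro ⟨k, hklt, rfl, rfl⟩
          have hpk : p.getD k 0 = p[k] := List.getD_eq_getElem p 0 hklt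
          have hvp : p[k] ∈ p := List.getElem_mem hklt
          have hidx : List.idxOf p[k] p = k := by
            have hlt2 : List.idxOf p[k] p < p.length := List.idxOf_lt_length_of_mem hvp
            exact hnd.getElem_inj_iff.mp (List.getElem_idxOf hlt2)
          exact ⟨p[k], (hmem _).mp hvp, by rw [hpk], by rw [hidx]; ring⟩
      · rw [List.pairwise_map]
        exact PySem.List.pairwise_lt_pyRange_one 1 (n+1)
    rw [hsort]
    -- now show the scatter fold is that same position map
    have h0n : PySem.List.pyRange 0 n 1 = (List.range n.toNat).map (fun k : ℕ => (k : Int)) := by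
      conv_lhs => rw [← hNn]
      exact PySem.List.pyRange_zero_nat n.toNat
    rw [h0n, List.foldl_map]
    apply List.ext_getElem?
    intro j
    by_cases hj : j < n.toNat
    · -- position j holds idxOf (1+j) p + 1 on both sides
      have hvmem : ((1 : Int) + (j : Int)) ∈ p := (hmem _).mpr ⟨by omega, by omega⟩
      have hklt : List.idxOf ((1 : Int) + (j : Int)) p < p.length :=
        List.idxOf_lt_length_of_mem hvmem
      have hpk : p[List.idxOf ((1 : Int) + (j : Int)) p] = 1 + (j : Int) :=
        List.getElem_idxOf hklt
      have hget : ∀ k : ℕ, (hk : k < p.length) → PySem.List.pyGetD p (k : Int) 0 = p[k] :=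
        fun k hk => PySem.List.pyGetD_eq_getElem p 0 (by omega) (by exact_mod_cast hk)
      have hg : ((PySem.List.pyGetD p (List.idxOf ((1 : Int) + (j : Int)) p : Int) 0) - 1).toNat
          = j := by
        rw [hget _ hklt]
        rw [hpk]; omega
      have hrhs : (((PySem.List.pyRange 1 (n+1) 1).map
          (fun v => (v, (List.idxOf v p : Int) + 1))).map (fun t => t.2))[j]?
          = some ((List.idxOf ((1 : Int) + (j : Int)) p : Int) + 1) := by
        rw [List.map_map, List.getElem?_map]
        have : (PySem.List.pyRange 1 (n+1) 1)[j]? = some (1 + (j : Int)) := by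
          rw [List.getElem?_eq_getElem (by rw [hRlen]; exact hj)]
          rw [PySem.List.getElem_pyRange_one]
        rw [this]
        rfl
      have hfold := pv_foldl_set_get (List.range n.toNat)
        (fun k : ℕ => ((PySem.List.pyGetD p (k : Int) 0) - 1).toNat)
        (fun k : ℕ => (k : Int) + 1) (List.replicate n.toNat 0)
        (List.idxOf ((1 : Int) + (j : Int)) p)
        (by rw [List.mem_range]; omega)
        (by
          intro k' hk' hgk'
          rw [List.mem_range] at hk'
          have hk'l : k' < p.length := by omega
          have hgk2 : ((PySem.List.pyGetD p (k' : Int) 0) - 1).toNat = j := by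
            rw [← hg]; exact hgk'
          rw [hget k' hk'l] at hgk2
          have h1p : 1 ≤ p[k'] := ((hmem _).mp (List.getElem_mem hk'l)).1
          have hval : p[k'] = 1 + (j : Int) := by omega
          apply hnd.getElem_inj_iff.mp
          exact hval.trans hpk.symm)
        (by
          show ((PySem.List.pyGetD p (List.idxOf ((1 : Int) + (j : Int)) p : Int) 0) - 1).toNat
            < (List.replicate n.toNat (0 : Int)).length
          rw [hg, List.length_replicate]; exact hj)
      dsimp only at hfold
      rw [hg] at hfold
      rw [hrhs, hfold]
    · -- past the end: both none
      rw [List.getElem?_eq_none, List.getElem?_eq_none]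
      · simp only [List.length_map, hRlen]; omega
      · rw [pv_foldl_set_length, List.length_replicate]; omega

-- ===== VERDICT (by name: the statement is the Claim_ definition above) =====
theorem invdictionary_spec : Claim_equal_invdictionary := by
  intro n _
  unfold Spec_invdictionary invdictionary invdictionary_alt
  have hnd : (PySem.List.permutations (PySem.List.pyRange 1 (n+1) 1)
      (PySem.List.pyRange 1 (n+1) 1).length).Nodup :=
    pv_perms_nodup _ _ (PySem.List.nodup_pyRange_one 1 (n+1))
  rw [PySem.Dict.ofList, PySem.Dict.update, List.foldl_map]
  rw [PySem.Dict.items_foldl_insert_fresh _ (fun perm => perm) _ _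
      (fun a _ => PySem.Dict.contains_empty a) (by simpa using hnd)]
  rw [PySem.Dict.items_foldl_insert_fresh _ (fun perm => perm) _ _
      (fun a _ => PySem.Dict.contains_empty a) (by simpa using hnd)]
  simp only [PySem.Dict.empty, List.nil_append]
  apply List.map_congr_left
  intro perm hperm
  have hp := PySem.List.perm_of_mem_permutations hperm
  exact congrArg (fun l => (perm, l)) (pv_inv_eq n perm hp)
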